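-- pv_equiv track=rewrite | github.com/pauloaviana/ndde_project | src/utils/fitness.py | max_cut_fitness
-- ===== SOURCE A (Python) =====
-- def max_cut_fitness(integer_gene, adj_matrix, adj_list):
--     partition = [i for i in range(len(integer_gene)) if integer_gene[i] == 0]
--     fitness = 0
--
--     for ver in partition:
--         edges = adj_list[ver]
--         for e in edges:
--             if not (e in partition):
--                 fitness += adj_matrix[ver][e]
--
--     return fitness
-- ===== SOURCE B (Python) =====
-- def max_cut_fitness(integer_gene, adj_matrix, adj_list):
--     n = len(integer_gene)
--     fitness = 0
--     for i in range(n):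
--         if integer_gene[i] == 0:
--             row = adj_matrix[i]
--             for j in range(n):
--                 if integer_gene[j] != 0:
--                     fitness += row[j]
--     return fitness
-- ===== Notes on version B (the rewrite author's own statement) =====
-- stated objective: alternative
-- what changed: B computes the cut weight directly from the dense weight matrix (double loop over vertex indices, testing genes), never touching adj_list; Pre_ restricts to the natural domain where adj_matrix and adj_list describe the same graph on the partition vertices (in-range, duplicate-free neighbour lists, zero weight for non-edges), since outside it the two representations disagree and either value is an artefact of which structure is read.
-- outside the precondition, e.g. on max_cut_fitness([0, 1], [[0, 9], [0, 0]], [[], []]): A returns 0, B returns 9; on max_cut_fitness([0, 1], [[0, 5], [0, 0]], [[1, 1], []]): A returns 10, B returns 5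
import Mathlib
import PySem

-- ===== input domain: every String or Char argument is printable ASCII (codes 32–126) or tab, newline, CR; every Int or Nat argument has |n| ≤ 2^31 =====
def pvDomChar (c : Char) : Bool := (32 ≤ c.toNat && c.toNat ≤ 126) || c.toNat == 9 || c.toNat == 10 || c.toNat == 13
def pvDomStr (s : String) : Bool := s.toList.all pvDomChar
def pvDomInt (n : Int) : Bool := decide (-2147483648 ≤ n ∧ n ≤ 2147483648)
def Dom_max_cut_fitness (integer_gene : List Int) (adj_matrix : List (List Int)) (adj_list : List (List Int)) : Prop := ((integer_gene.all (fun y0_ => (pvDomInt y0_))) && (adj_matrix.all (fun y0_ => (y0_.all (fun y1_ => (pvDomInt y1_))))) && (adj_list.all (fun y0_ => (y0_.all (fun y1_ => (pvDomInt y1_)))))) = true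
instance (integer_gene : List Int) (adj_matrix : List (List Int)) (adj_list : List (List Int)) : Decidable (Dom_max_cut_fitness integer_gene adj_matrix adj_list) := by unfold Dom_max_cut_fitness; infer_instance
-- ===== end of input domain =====

-- B drives the computation off the dense weight matrix (double loop over vertex indices,
-- testing genes directly) and never reads adj_list; a different data structure, not faster.

-- ===== PORT A =====
def max_cut_fitness (integer_gene : List Int) (adj_matrix : List (List Int)) (adj_list : List (List Int)) : Int :=
  let partition : List Int :=
    (PySem.List.pyRange 0 (integer_gene.length : Int) 1).filter
      (fun i => PySem.List.pyGetD integer_gene i 0 == 0)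
  let fitness : Int := 0
  let fitness :=
    partition.foldl (fun fitness ver =>
      let edges := PySem.List.pyGetD adj_list ver []
      edges.foldl (fun fitness e =>
        if !(partition.contains e) then
          fitness + PySem.List.pyGetD (PySem.List.pyGetD adj_matrix ver []) e 0
        else fitness) fitness) fitness
  fitness

-- ===== PORT B =====
def max_cut_fitness_alt (integer_gene : List Int) (adj_matrix : List (List Int)) (adj_list : List (List Int)) : Int :=
  let n : Int := (integer_gene.length : Int)
  (PySem.List.pyRange 0 n 1).foldl (fun fitness i =>
    if PySem.List.pyGetD integer_gene i 0 == 0 then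
      let row := PySem.List.pyGetD adj_matrix i []
      (PySem.List.pyRange 0 n 1).foldl (fun fitness j =>
        if !(PySem.List.pyGetD integer_gene j 0 == 0) then
          fitness + PySem.List.pyGetD row j 0
        else fitness) fitness
    else fitness) 0

-- ===== PRECONDITION & SPEC =====
-- B reads weights off adj_matrix, so Pre_ restricts to the natural domain where adj_matrix and
-- adj_list describe the same graph at every partition vertex: neighbour indices in range
-- (elsewhere A raises or wraps), duplicate-free neighbour lists, and zero matrix weight for
-- every non-neighbour; it also excludes inputs where A raises (short adj_list/adj_matrix rows).
def Pre_max_cut_fitness (integer_gene : List Int) (adj_matrix : List (List Int)) (adj_list : List (List Int)) : Prop :=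
  ∀ i ∈ List.range integer_gene.length, integer_gene.getD i 1 = 0 →
    i < adj_list.length ∧ i < adj_matrix.length ∧
    integer_gene.length ≤ (adj_matrix.getD i []).length ∧
    (adj_list.getD i []).Nodup ∧
    (∀ e ∈ adj_list.getD i [], 0 ≤ e ∧ e < (integer_gene.length : Int)) ∧
    (∀ j ∈ List.range integer_gene.length, ((j : Int) ∈ adj_list.getD i [] → False) →
      (adj_matrix.getD i []).getD j 1 = 0)
instance (integer_gene : List Int) (adj_matrix : List (List Int)) (adj_list : List (List Int)) : Decidable (Pre_max_cut_fitness integer_gene adj_matrix adj_list) := by unfold Pre_max_cut_fitness; infer_instance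

def pvWitness_max_cut_fitness : List Int × List (List Int) × List (List Int) :=
  ([0, 1, 0], [[0, 5, 0], [5, 0, 2], [0, 2, 0]], [[1], [0, 2], [1]])

def Spec_max_cut_fitness (integer_gene : List Int) (adj_matrix : List (List Int)) (adj_list : List (List Int)) (out : Int) : Prop := out = max_cut_fitness_alt integer_gene adj_matrix adj_list
instance (integer_gene : List Int) (adj_matrix : List (List Int)) (adj_list : List (List Int)) (out : Int) : Decidable (Spec_max_cut_fitness integer_gene adj_matrix adj_list out) := by unfold Spec_max_cut_fitness; infer_instance

-- ===== CLAIM (what is proved, stated in full; the proofs are below) =====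
def Claim_equal_max_cut_fitness : Prop := ∀ (integer_gene : List Int) (adj_matrix : List (List Int)) (adj_list : List (List Int)), Dom_max_cut_fitness integer_gene adj_matrix adj_list → Pre_max_cut_fitness integer_gene adj_matrix adj_list → Spec_max_cut_fitness integer_gene adj_matrix adj_list (max_cut_fitness integer_gene adj_matrix adj_list)

-- ===== LEMMAS AND PROOFS =====

-- a guarded accumulating fold is the sum of the filtered, mapped list
lemma fold_if_sum (q : Int → Bool) (f : Int → Int) :
    ∀ (xs : List Int) (acc : Int),
      xs.foldl (fun a e => if q e then a + f e else a) acc = acc + ((xs.filter q).map f).sum := by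
  intro xs
  induction xs with
  | nil => intro acc; simp
  | cons x xs ih =>
    intro acc
    by_cases h : q x = true
    · simp [List.foldl_cons, h, ih]; ring
    · simp [List.foldl_cons, h, ih]

-- membership in A's partition list as a direct test
lemma contains_partition (g : List Int) (e : Int) :
    ((PySem.List.pyRange 0 (g.length : Int) 1).filter
        (fun i => PySem.List.pyGetD g i 0 == 0)).contains e
      = (decide (0 ≤ e) && decide (e < (g.length : Int)) && (PySem.List.pyGetD g e 0 == 0)) := by
  apply Bool.eq_iff_iff.mpr
  simp only [List.contains_iff_mem, List.mem_filter,
    PySem.List.mem_pyRange_one, Bool.and_eq_true, decide_eq_true_eq, beq_iff_eq]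

-- dropping zero-weight entries from a summed map
lemma sum_map_filter_zero (p : Int → Bool) (w : Int → Int) :
    ∀ (xs : List Int), (∀ x ∈ xs, p x = false → w x = 0) →
      ((xs.filter p).map w).sum = (xs.map w).sum := by
  intro xs
  induction xs with
  | nil => intro _; simp
  | cons x xs ih =>
    intro h
    by_cases hx : p x = true
    · simp [hx, ih (fun y hy => h y (List.mem_cons_of_mem _ hy))]
    · have h0 : w x = 0 := h x (List.mem_cons_self) (by simp_all)
      simp [hx, ih (fun y hy => h y (List.mem_cons_of_mem _ hy)), h0]

-- pyRange 0 n 1 has no duplicates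
lemma nodup_pyRange (n : Nat) : (PySem.List.pyRange 0 (n : Int) 1).Nodup := by
  rw [PySem.List.pyRange_zero_natCast]
  exact (List.nodup_range).map (fun a b => by exact_mod_cast id)

-- ===== VERDICT (by name: the statement is the Claim_ definition above) =====
theorem max_cut_fitness_spec : Claim_equal_max_cut_fitness := by
  intro g M L _ hpre
  unfold Spec_max_cut_fitness max_cut_fitness max_cut_fitness_alt
  dsimp only
  set n : Nat := g.length with hn
  set P : List Int :=
    (PySem.List.pyRange 0 (n : Int) 1).filter (fun i => PySem.List.pyGetD g i 0 == 0) with hP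
  -- B's outer guarded fold is a fold over the filtered range, i.e. over P
  rw [PySem.List.foldl_if_eq_foldl_filter]
  -- both sides are folds over P; rewrite each body to acc + (sum of a mapped filter)
  have hA : ∀ acc ver, (PySem.List.pyGetD L ver []).foldl (fun fitness e =>
        if !(P.contains e) then
          fitness + PySem.List.pyGetD (PySem.List.pyGetD M ver []) e 0
        else fitness) acc
      = acc + (((PySem.List.pyGetD L ver []).filter (fun e => !(P.contains e))).map
          (fun e => PySem.List.pyGetD (PySem.List.pyGetD M ver []) e 0)).sum := by
    intro acc ver; exact fold_if_sum _ _ _ acc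
  have hB : ∀ acc i, (PySem.List.pyRange 0 (n : Int) 1).foldl (fun fitness j =>
        if !(PySem.List.pyGetD g j 0 == 0) then
          fitness + PySem.List.pyGetD (PySem.List.pyGetD M i []) j 0
        else fitness) acc
      = acc + (((PySem.List.pyRange 0 (n : Int) 1).filter (fun j => !(PySem.List.pyGetD g j 0 == 0))).map
          (fun j => PySem.List.pyGetD (PySem.List.pyGetD M i []) j 0)).sum := by
    intro acc i; exact fold_if_sum _ _ _ acc
  -- pointwise equality of the two inner sums on members of P
  have key : ∀ i ∈ P,
      (((PySem.List.pyGetD L i []).filter (fun e => !(P.contains e))).map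
          (fun e => PySem.List.pyGetD (PySem.List.pyGetD M i []) e 0)).sum
      = (((PySem.List.pyRange 0 (n : Int) 1).filter (fun j => !(PySem.List.pyGetD g j 0 == 0))).map
          (fun j => PySem.List.pyGetD (PySem.List.pyGetD M i []) j 0)).sum := by
    intro i hi
    rw [hP, List.mem_filter, PySem.List.mem_pyRange_one] at hi
    obtain ⟨⟨hi0, hin⟩, hg0⟩ := hi
    set k : Nat := i.toNat with hk
    have hik : i = (k : Int) := by omega
    have hkn : k < n := by omega
    have hgk : g.getD k 1 = 0 := by
      have := hg0
      rw [hik, PySem.List.pyGetD_natCast] at this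
      simp only [beq_iff_eq] at this
      rw [List.getD_eq_getElem?_getD] at this ⊢
      rwa [List.getElem?_eq_getElem hkn] at this ⊢
    obtain ⟨hL, hM, hrow, hnd, hrange, hzero⟩ := hpre k (List.mem_range.mpr hkn) hgk
    rw [hik, PySem.List.pyGetD_natCast, PySem.List.pyGetD_natCast]
    set Lk := L.getD k [] with hLk
    set row := M.getD k [] with hrowdef
    set q : Int → Bool := fun e => !(PySem.List.pyGetD g e 0 == 0) with hq
    set w : Int → Int := fun e => PySem.List.pyGetD row e 0 with hw
    -- on members of Lk, ¬contains = q
    have hfilt : Lk.filter (fun e => !(P.contains e)) = Lk.filter q := by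
      apply List.filter_congr
      intro e he
      obtain ⟨he0, hen⟩ := hrange e he
      rw [hP, contains_partition]
      simp [hq, he0, hen]
    rw [hfilt]
    -- zero weights outside Lk drop out of the range sum
    have hz : ∀ x ∈ (PySem.List.pyRange 0 (n : Int) 1).filter q,
        (Lk.contains x) = false → w x = 0 := by
      intro x hx hnotin
      rw [List.mem_filter, PySem.List.mem_pyRange_one] at hx
      obtain ⟨⟨hx0, hxn⟩, _⟩ := hx
      have hxk : x = ((x.toNat : Nat) : Int) := by omega
      have hxlt : x.toNat < n := by omega
      have h0 : row.getD x.toNat 1 = 0 := by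
        apply hzero x.toNat (List.mem_range.mpr hxlt)
        intro hmem
        rw [← hxk] at hmem
        simp [hmem] at hnotin
      have hxr : x.toNat < row.length := lt_of_lt_of_le hxlt hrow
      simp only [hw]
      rw [hxk, PySem.List.pyGetD_natCast]
      rw [List.getD_eq_getElem?_getD, List.getElem?_eq_getElem hxr] at h0 ⊢
      exact h0
    rw [← sum_map_filter_zero (fun e => Lk.contains e) w _ hz]
    -- the two filtered lists are permutations: both nodup, same membership
    have hperm : List.Perm (((PySem.List.pyRange 0 (n : Int) 1).filter q).filter (fun e => Lk.contains e))
        (Lk.filter q) := by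
      rw [List.perm_ext_iff_of_nodup
        (((nodup_pyRange n).filter q).filter _) (hnd.filter q)]
      intro a
      simp only [List.mem_filter, PySem.List.mem_pyRange_one, List.contains_iff_mem]
      constructor
      · rintro ⟨⟨_, hqa⟩, ha⟩; exact ⟨ha, hqa⟩
      · rintro ⟨ha, hqa⟩
        obtain ⟨ha0, han⟩ := hrange a ha
        exact ⟨⟨⟨ha0, han⟩, hqa⟩, ha⟩
    exact (hperm.map w).sum_eq.symm
  -- combine: same fold over P with pointwise-equal bodies
  rw [← hP]
  apply PySem.List.foldl_congr_mem
  intro acc ver hv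
  rw [hA acc ver, hB acc ver, key ver hv]
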